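-- pv_equiv track=rewrite | github.com/robertmonroe/EditScribe | backend/core/project_manager.py | _format_stage_markdown
-- ===== SOURCE A (Python) =====
-- def _format_stage_markdown(stage: str, issues: list) -> str:
--     """Format stage report as Markdown"""
--     sections = []
--
--     sections.append(f"# {stage.title()} Editor Report\n\n")
--     sections.append(f"**Total Issues Found:** {len(issues)}\n\n")
--
--     # Group by severity
--     by_severity = {}
--     for issue in issues:
--         severity = issue.get("severity", "unknown")
--         if severity not in by_severity:
--             by_severity[severity] = []
--         by_severity[severity].append(issue)
--
--     for severity in ["critical", "major", "minor"]:
--         if severity in by_severity: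
--             sections.append(f"## {severity.upper()} Issues ({len(by_severity[severity])})\n\n")
--
--             for issue in by_severity[severity]:
--                 sections.append(f"### {issue.get('category', 'Unknown').title()}\n")
--                 sections.append(f"**Location:** {issue.get('location', 'Unknown')}\n\n")
--                 sections.append(f"**Description:** {issue.get('description', 'N/A')}\n\n")
--                 sections.append(f"**Suggestion:** {issue.get('suggestion', 'N/A')}\n\n")
--                 sections.append("---\n\n")
--
--     return "".join(sections)
-- ===== SOURCE B (Python) =====
-- def _format_stage_markdown(stage: str, issues: list) -> str:
--     """Format stage report as Markdown (no severity dict: direct per-severity filtering)."""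
--     def block(i):
--         return (f"### {i.get('category', 'Unknown').title()}\n"
--                 f"**Location:** {i.get('location', 'Unknown')}\n\n"
--                 f"**Description:** {i.get('description', 'N/A')}\n\n"
--                 f"**Suggestion:** {i.get('suggestion', 'N/A')}\n\n"
--                 "---\n\n")
--
--     def section(severity):
--         matches = [i for i in issues if i.get("severity", "unknown") == severity]
--         if not matches:
--             return ""
--         return (f"## {severity.upper()} Issues ({len(matches)})\n\n"
--                 + "".join(map(block, matches)))
--
--     return (f"# {stage.title()} Editor Report\n\n"
--             f"**Total Issues Found:** {len(issues)}\n\n"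
--             + "".join(section(s) for s in ("critical", "major", "minor")))
-- ===== Notes on version B (the rewrite author's own statement) =====
-- stated objective: simpler
-- what changed: Drops the by_severity dict-building pass and the mutable sections list: each severity section is computed functionally by filtering issues directly and joining per-issue blocks.
import Mathlib
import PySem

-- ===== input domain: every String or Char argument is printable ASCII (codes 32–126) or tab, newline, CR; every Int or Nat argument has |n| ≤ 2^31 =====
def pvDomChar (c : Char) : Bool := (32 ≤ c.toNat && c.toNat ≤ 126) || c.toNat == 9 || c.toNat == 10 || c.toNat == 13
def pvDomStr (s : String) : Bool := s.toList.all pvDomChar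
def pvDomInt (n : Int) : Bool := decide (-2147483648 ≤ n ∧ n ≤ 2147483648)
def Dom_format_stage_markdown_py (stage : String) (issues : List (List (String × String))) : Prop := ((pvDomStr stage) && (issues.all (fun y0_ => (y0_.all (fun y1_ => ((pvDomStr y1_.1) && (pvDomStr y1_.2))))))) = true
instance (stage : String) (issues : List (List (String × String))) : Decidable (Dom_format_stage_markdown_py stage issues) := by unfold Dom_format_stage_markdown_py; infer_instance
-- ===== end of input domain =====

-- B drops A's by_severity dict and mutable sections list: each severity section is built
-- functionally by filtering the issues directly (objective: simpler).

-- shared helpers for Python primitives both sources use: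
-- issue.get(k, dflt) on a dict rendered as an association list (first match)
def pvGetD (l : List (String × String)) (k dflt : String) : String :=
  match l.find? (fun p => p.1 == k) with
  | some p => p.2
  | none => dflt

-- str.title(): hand port, exact on ASCII (Dom): a letter after a non-letter is uppercased,
-- a letter after a letter is lowercased, other characters unchanged
def pvTitleGo : Bool → List Char → List Char
  | _, [] => []
  | prev, c :: rest =>
    if PySem.Chars.isalpha c then
      (if prev then PySem.Chars.lowerChar c else PySem.Chars.upperChar c) :: pvTitleGo true rest
    else c :: pvTitleGo false rest

def pvTitle (s : String) : String := String.ofList (pvTitleGo false s.toList)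

-- ===== PORT A =====
def format_stage_markdown_py (stage : String) (issues : List (List (String × String))) : String :=
  let sections : List String := []
  let sections := sections ++ ["# " ++ pvTitle stage ++ " Editor Report\n\n"]
  let sections := sections ++ ["**Total Issues Found:** " ++ PySem.Int.toStr (issues.length : Int) ++ "\n\n"]
  let by_severity : PySem.Dict String (List (List (String × String))) :=
    issues.foldl (fun d issue =>
      let severity := pvGetD issue "severity" "unknown"
      let d := if d.contains severity = false then d.insert severity [] else d
      d.modify severity [] (fun l => l ++ [issue])) PySem.Dict.empty
  let sections := (["critical", "major", "minor"] : List String).foldl (fun secs severity =>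
    if by_severity.contains severity then
      let bucket := by_severity.getD severity []
      let secs := secs ++ ["## " ++ PySem.Str.upper severity ++ " Issues (" ++ PySem.Int.toStr (bucket.length : Int) ++ ")\n\n"]
      bucket.foldl (fun secs issue =>
        let secs := secs ++ ["### " ++ pvTitle (pvGetD issue "category" "Unknown") ++ "\n"]
        let secs := secs ++ ["**Location:** " ++ pvGetD issue "location" "Unknown" ++ "\n\n"]
        let secs := secs ++ ["**Description:** " ++ pvGetD issue "description" "N/A" ++ "\n\n"]
        let secs := secs ++ ["**Suggestion:** " ++ pvGetD issue "suggestion" "N/A" ++ "\n\n"]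
        secs ++ ["---\n\n"]) secs
    else secs) sections
  PySem.Str.join "" sections

-- ===== PORT B =====
def pvBlock (i : List (String × String)) : String :=
  "### " ++ pvTitle (pvGetD i "category" "Unknown") ++ "\n" ++
  "**Location:** " ++ pvGetD i "location" "Unknown" ++ "\n\n" ++
  "**Description:** " ++ pvGetD i "description" "N/A" ++ "\n\n" ++
  "**Suggestion:** " ++ pvGetD i "suggestion" "N/A" ++ "\n\n" ++
  "---\n\n"

def pvSection (issues : List (List (String × String))) (severity : String) : String :=
  let ms := issues.filter (fun i => pvGetD i "severity" "unknown" == severity)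
  if ms.isEmpty then "" else
    "## " ++ PySem.Str.upper severity ++ " Issues (" ++ PySem.Int.toStr (ms.length : Int) ++ ")\n\n"
      ++ PySem.Str.join "" (ms.map pvBlock)

def format_stage_markdown_py_alt (stage : String) (issues : List (List (String × String))) : String :=
  "# " ++ pvTitle stage ++ " Editor Report\n\n" ++
  "**Total Issues Found:** " ++ PySem.Int.toStr (issues.length : Int) ++ "\n\n" ++
  PySem.Str.join "" ((["critical", "major", "minor"] : List String).map (pvSection issues))

-- ===== PRECONDITION & SPEC =====
def Spec_format_stage_markdown_py (stage : String) (issues : List (List (String × String))) (out : String) : Prop := out = format_stage_markdown_py_alt stage issues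
instance (stage : String) (issues : List (List (String × String))) (out : String) : Decidable (Spec_format_stage_markdown_py stage issues out) := by unfold Spec_format_stage_markdown_py; infer_instance

-- ===== CLAIM (what is proved, stated in full; the proofs are below) =====
def Claim_equal_format_stage_markdown_py : Prop := ∀ (stage : String) (issues : List (List (String × String))), Dom_format_stage_markdown_py stage issues → Spec_format_stage_markdown_py stage issues (format_stage_markdown_py stage issues)

-- ===== LEMMAS AND PROOFS =====

-- "".join on String level
theorem pv_join_nil : PySem.Str.join "" ([] : List String) = "" := by
  rw [← String.toList_inj]; simp [PySem.Str.toList_join, PySem.Chars.join_nil]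

theorem pv_join_cons (s : String) (l : List String) :
    PySem.Str.join "" (s :: l) = s ++ PySem.Str.join "" l := by
  rw [← String.toList_inj]
  cases l with
  | nil => simp [PySem.Str.toList_join, PySem.Chars.join_singleton, PySem.Chars.join_nil]
  | cons t ts => simp [PySem.Str.toList_join, PySem.Chars.join_cons_cons]

theorem pv_join_append (l1 l2 : List String) :
    PySem.Str.join "" (l1 ++ l2) = PySem.Str.join "" l1 ++ PySem.Str.join "" l2 := by
  induction l1 with
  | nil => simp [pv_join_nil]
  | cons s l ih =>
      rw [List.cons_append, pv_join_cons, pv_join_cons, ih, ← String.toList_inj]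
      simp

-- the five strings A appends per issue, in order
def pvLines (i : List (String × String)) : List String :=
  ["### " ++ pvTitle (pvGetD i "category" "Unknown") ++ "\n",
   "**Location:** " ++ pvGetD i "location" "Unknown" ++ "\n\n",
   "**Description:** " ++ pvGetD i "description" "N/A" ++ "\n\n",
   "**Suggestion:** " ++ pvGetD i "suggestion" "N/A" ++ "\n\n",
   "---\n\n"]

theorem pv_join_lines (i : List (String × String)) :
    PySem.Str.join "" (pvLines i) = pvBlock i := by
  rw [← String.toList_inj]
  simp [pvLines, pvBlock, pv_join_cons, pv_join_nil]

-- A's grouping step, looked up pointwise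
theorem pv_step_getD (d : PySem.Dict String (List (List (String × String))))
    (issue : List (String × String)) (c k : String) :
    ((if d.contains k = false then d.insert k [] else d).modify k []
      (fun l => l ++ [issue])).getD c []
    = if k == c then d.getD c [] ++ [issue] else d.getD c [] := by
  have hd : ∀ (d' : PySem.Dict String (List (List (String × String)))),
      d'.getD k [] = d.getD k [] →
      (∀ c', c' ≠ k → d'.getD c' [] = d.getD c' []) →
      (d'.modify k [] (fun l => l ++ [issue])).getD c []
        = if k == c then d.getD c [] ++ [issue] else d.getD c [] := by
    intro d' h1 h2
    rw [PySem.Dict.getD_modify]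
    by_cases h : c = k
    · subst h; simp [h1]
    · rw [if_neg h, h2 c h, if_neg (by simpa [beq_iff_eq] using fun a => h a.symm)]
  by_cases hc : d.contains k = false
  · rw [if_pos hc]
    have hk : d.getD k [] = [] := by
      have h0 := (PySem.Dict.get?_eq_none_iff_contains d k).2 hc
      simp [PySem.Dict.getD, h0]
    exact hd _ (by rw [PySem.Dict.getD_insert_self, hk])
      (fun c' h => PySem.Dict.getD_insert_of_ne d _ _ h)
  · rw [if_neg hc]
    exact hd d rfl (fun _ _ => rfl)

theorem pv_step_contains (d : PySem.Dict String (List (List (String × String))))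
    (issue : List (String × String)) (c k : String) :
    ((if d.contains k = false then d.insert k [] else d).modify k []
      (fun l => l ++ [issue])).contains c
    = (k == c || d.contains c) := by
  by_cases hc : d.contains k = false
  · simp [hc, PySem.Dict.contains_modify, PySem.Dict.contains_insert, BEq.comm]
  · simp [hc, PySem.Dict.contains_modify, BEq.comm]

-- the grouping fold, looked up pointwise: the bucket at c is the filter, membership is any
theorem pv_fold_getD (issues : List (List (String × String)))
    (d : PySem.Dict String (List (List (String × String)))) (c : String) :
    (issues.foldl (fun d issue =>
      let severity := pvGetD issue "severity" "unknown"
      let d := if d.contains severity = false then d.insert severity [] else d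
      d.modify severity [] (fun l => l ++ [issue])) d).getD c []
    = d.getD c [] ++ issues.filter (fun i => pvGetD i "severity" "unknown" == c) := by
  induction issues generalizing d with
  | nil => simp
  | cons i is ih =>
      simp only [List.foldl_cons, List.filter_cons]
      rw [ih, pv_step_getD]
      by_cases h : pvGetD i "severity" "unknown" == c
      · simp [h]
      · simp [h] at *

theorem pv_fold_contains (issues : List (List (String × String)))
    (d : PySem.Dict String (List (List (String × String)))) (c : String) :
    (issues.foldl (fun d issue =>
      let severity := pvGetD issue "severity" "unknown"
      let d := if d.contains severity = false then d.insert severity [] else d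
      d.modify severity [] (fun l => l ++ [issue])) d).contains c
    = (d.contains c || issues.any (fun i => pvGetD i "severity" "unknown" == c)) := by
  induction issues generalizing d with
  | nil => simp
  | cons i is ih =>
      simp only [List.foldl_cons, List.any_cons]
      rw [ih, pv_step_contains]
      by_cases h : pvGetD i "severity" "unknown" == c <;> simp [h]

-- A's inner per-issue loop appends exactly pvLines per issue
theorem pv_inner_loop (bucket : List (List (String × String))) (secs : List String) :
    bucket.foldl (fun secs issue =>
        secs ++ ["### " ++ pvTitle (pvGetD issue "category" "Unknown") ++ "\n"]
             ++ ["**Location:** " ++ pvGetD issue "location" "Unknown" ++ "\n\n"]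
             ++ ["**Description:** " ++ pvGetD issue "description" "N/A" ++ "\n\n"]
             ++ ["**Suggestion:** " ++ pvGetD issue "suggestion" "N/A" ++ "\n\n"]
             ++ ["---\n\n"]) secs
    = secs ++ bucket.flatMap pvLines := by
  have h : (fun (secs : List String) (issue : List (String × String)) =>
        secs ++ ["### " ++ pvTitle (pvGetD issue "category" "Unknown") ++ "\n"]
             ++ ["**Location:** " ++ pvGetD issue "location" "Unknown" ++ "\n\n"]
             ++ ["**Description:** " ++ pvGetD issue "description" "N/A" ++ "\n\n"]
             ++ ["**Suggestion:** " ++ pvGetD issue "suggestion" "N/A" ++ "\n\n"]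
             ++ ["---\n\n"])
      = fun secs issue => secs ++ pvLines issue := by
    funext secs issue; simp [pvLines]
  rw [h, PySem.List.foldl_append_eq_flatMap]

-- one severity's worth of A's sections list joins to B's pvSection
theorem pv_section_eq (issues : List (List (String × String))) (c : String) :
    PySem.Str.join ""
      (if issues.any (fun i => pvGetD i "severity" "unknown" == c) then
        ("## " ++ PySem.Str.upper c ++ " Issues (" ++
          PySem.Int.toStr ((issues.filter (fun i => pvGetD i "severity" "unknown" == c)).length : Int) ++ ")\n\n")
        :: (issues.filter (fun i => pvGetD i "severity" "unknown" == c)).flatMap pvLines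
      else [])
    = pvSection issues c := by
  set m := issues.filter (fun i => pvGetD i "severity" "unknown" == c) with hm
  have hme : m.isEmpty = !(issues.any (fun i => pvGetD i "severity" "unknown" == c)) := by
    by_cases h : issues.any (fun i => pvGetD i "severity" "unknown" == c)
    · simp [h, hm, List.isEmpty_eq_false_iff, List.filter_eq_nil_iff]
      simp [List.any_eq_true] at h
      exact h
    · simp [h, hm, List.isEmpty_iff, List.filter_eq_nil_iff]
      simp [List.any_eq_true] at h
      exact h
  have hjoin : PySem.Str.join "" (m.flatMap pvLines) = PySem.Str.join "" (m.map pvBlock) := by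
    induction m with
    | nil => simp
    | cons x xs ih =>
        simp only [List.flatMap_cons, List.map_cons]
        rw [pv_join_append, pv_join_lines, pv_join_cons, ih]
  by_cases h : issues.any (fun i => pvGetD i "severity" "unknown" == c)
  · simp only [h, if_true, pvSection]
    rw [pv_join_cons, hjoin]
    simp [← hm, hme, h]
  · simp only [h, pvSection]
    simp [← hm, hme, h, pv_join_nil]

-- ===== VERDICT (by name: the statement is the Claim_ definition above) =====
theorem format_stage_markdown_py_spec : Claim_equal_format_stage_markdown_py := by
  intro stage issues _
  unfold Spec_format_stage_markdown_py format_stage_markdown_py format_stage_markdown_py_alt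
  simp only [List.foldl_cons, List.foldl_nil, List.map_cons, List.map_nil, List.nil_append]
  rw [pv_fold_contains, pv_fold_contains, pv_fold_contains,
      pv_fold_getD, pv_fold_getD, pv_fold_getD]
  simp only [PySem.Dict.contains_empty, PySem.Dict.getD_empty, Bool.false_or, List.nil_append]
  rw [pv_inner_loop, pv_inner_loop, pv_inner_loop]
  have hite : ∀ (c : Bool) (s : List String) (hdr : String) (fl : List String),
      (if c = true then (s ++ [hdr]) ++ fl else s) = s ++ (if c = true then hdr :: fl else []) := by
    intro c s hdr fl; cases c <;> simp
  rw [hite, hite, hite]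
  rw [pv_join_append, pv_join_append, pv_join_append]
  rw [pv_section_eq issues "critical", pv_section_eq issues "major", pv_section_eq issues "minor"]
  rw [pv_join_append, pv_join_cons, pv_join_nil, pv_join_cons, pv_join_nil, ← String.toList_inj]
  simp [PySem.Chars.join_cons_cons, PySem.Chars.join_singleton]
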